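-- pv_equiv track=rewrite | github.com/mramirezraul71/atlas-core | atlas_code_quant/operations/decision_shadow.py | classify_error_taxonomy_v2
-- ===== SOURCE A (Python) =====
-- def classify_error_taxonomy_v2(reasons: list[str]) -> dict[str, int]:
--     buckets = {
--         "timing_error": 0,
--         "exit_error": 0,
--         "validation_error": 0,
--         "selection_error": 0,
--         "sizing_error": 0,
--         "regime_mismatch": 0,
--         "advisory_conflict": 0,
--         "missed_opportunity": 0,
--     }
--     lowered = [str(r or "").strip().lower() for r in reasons]
--     for reason in lowered:
--         if not reason:
--             continue
--         if "market_closed" in reason or "timing" in reason: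
--             buckets["timing_error"] += 1
--         if "exit" in reason or "de_risk" in reason:
--             buckets["exit_error"] += 1
--         if "validation" in reason or "spread" in reason or "drift" in reason:
--             buckets["validation_error"] += 1
--         if "open_symbol_guard" in reason or "options_only_requires_options" in reason or "selection" in reason:
--             buckets["selection_error"] += 1
--             buckets["missed_opportunity"] += 1
--         if "max open positions" in reason or "size" in reason or "sizing" in reason:
--             buckets["sizing_error"] += 1
--         if "regime" in reason:
--             buckets["regime_mismatch"] += 1
--         if "advisory" in reason or "local_model" in reason:
--             buckets["advisory_conflict"] += 1
--     return buckets
-- ===== SOURCE B (Python) =====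
-- def classify_error_taxonomy_v2(reasons: list[str]) -> dict[str, int]:
--     lowered = [str(r or "").strip().lower() for r in reasons]
--
--     def count(*kws):
--         return sum(1 for s in lowered if any(k in s for k in kws))
--
--     sel = count("open_symbol_guard", "options_only_requires_options", "selection")
--     return {
--         "timing_error": count("market_closed", "timing"),
--         "exit_error": count("exit", "de_risk"),
--         "validation_error": count("validation", "spread", "drift"),
--         "selection_error": sel,
--         "sizing_error": count("max open positions", "size", "sizing"),
--         "regime_mismatch": count("regime"),
--         "advisory_conflict": count("advisory", "local_model"),
--         "missed_opportunity": sel,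
--     }
-- ===== Notes on version B (the rewrite author's own statement) =====
-- stated objective: idiomatic
-- what changed: Per-reason incremental dict mutation is replaced by per-bucket counting: each bucket's value is computed independently as the count of normalized reasons containing one of its keywords, with the selection count shared by selection_error and missed_opportunity.
import Mathlib
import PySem

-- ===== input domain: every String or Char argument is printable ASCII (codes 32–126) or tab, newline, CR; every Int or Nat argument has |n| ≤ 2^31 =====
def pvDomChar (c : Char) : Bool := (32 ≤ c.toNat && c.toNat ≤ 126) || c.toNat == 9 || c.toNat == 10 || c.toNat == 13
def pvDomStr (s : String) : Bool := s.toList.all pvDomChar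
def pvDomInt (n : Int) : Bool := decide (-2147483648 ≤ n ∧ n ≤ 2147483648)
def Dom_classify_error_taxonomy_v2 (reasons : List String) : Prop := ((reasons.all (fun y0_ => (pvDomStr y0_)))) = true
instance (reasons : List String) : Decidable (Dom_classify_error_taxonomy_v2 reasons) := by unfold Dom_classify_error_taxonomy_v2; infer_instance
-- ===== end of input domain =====

-- B replaces A's per-reason incremental dict mutation by independent per-bucket counting (same cost, plainer).

-- ===== PORT A =====
-- str(r or "").strip().lower()
def pvNormA (r : String) : String :=
  PySem.Str.lower (PySem.Str.strip (if r = "" then "" else r))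

-- the body of A's 'for reason in lowered' loop
def pvStepA (d : PySem.Dict String Int) (reason : String) : PySem.Dict String Int :=
  if reason = "" then d else
  let d := if PySem.Str.isIn "market_closed" reason || PySem.Str.isIn "timing" reason then
             d.modify "timing_error" 0 (· + 1) else d
  let d := if PySem.Str.isIn "exit" reason || PySem.Str.isIn "de_risk" reason then
             d.modify "exit_error" 0 (· + 1) else d
  let d := if PySem.Str.isIn "validation" reason || PySem.Str.isIn "spread" reason || PySem.Str.isIn "drift" reason then
             d.modify "validation_error" 0 (· + 1) else d
  let d := if PySem.Str.isIn "open_symbol_guard" reason || PySem.Str.isIn "options_only_requires_options" reason || PySem.Str.isIn "selection" reason then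
             (d.modify "selection_error" 0 (· + 1)).modify "missed_opportunity" 0 (· + 1) else d
  let d := if PySem.Str.isIn "max open positions" reason || PySem.Str.isIn "size" reason || PySem.Str.isIn "sizing" reason then
             d.modify "sizing_error" 0 (· + 1) else d
  let d := if PySem.Str.isIn "regime" reason then
             d.modify "regime_mismatch" 0 (· + 1) else d
  let d := if PySem.Str.isIn "advisory" reason || PySem.Str.isIn "local_model" reason then
             d.modify "advisory_conflict" 0 (· + 1) else d
  d

def classify_error_taxonomy_v2 (reasons : List String) : List (String × Int) :=
  let buckets : PySem.Dict String Int := PySem.Dict.ofList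
    [("timing_error", 0), ("exit_error", 0), ("validation_error", 0), ("selection_error", 0),
     ("sizing_error", 0), ("regime_mismatch", 0), ("advisory_conflict", 0), ("missed_opportunity", 0)]
  let lowered := reasons.map pvNormA
  (lowered.foldl pvStepA buckets).items

-- ===== PORT B =====
-- str(r or "").strip().lower()  (B's copy of the normalization)
def pvNormB (r : String) : String :=
  PySem.Str.lower (PySem.Str.strip (if r = "" then "" else r))

-- any(k in s for k in kws)
def pvHit (kws : List String) (s : String) : Bool :=
  kws.any (fun k => PySem.Str.isIn k s)

-- sum(1 for s in lowered if any(k in s for k in kws))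
def pvCount (lowered : List String) (kws : List String) : Int :=
  (lowered.countP (pvHit kws) : Int)

def classify_error_taxonomy_v2_alt (reasons : List String) : List (String × Int) :=
  let lowered := reasons.map pvNormB
  let sel := pvCount lowered ["open_symbol_guard", "options_only_requires_options", "selection"]
  [("timing_error", pvCount lowered ["market_closed", "timing"]),
   ("exit_error", pvCount lowered ["exit", "de_risk"]),
   ("validation_error", pvCount lowered ["validation", "spread", "drift"]),
   ("selection_error", sel),
   ("sizing_error", pvCount lowered ["max open positions", "size", "sizing"]),
   ("regime_mismatch", pvCount lowered ["regime"]),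
   ("advisory_conflict", pvCount lowered ["advisory", "local_model"]),
   ("missed_opportunity", sel)]

-- ===== PRECONDITION & SPEC =====
def Spec_classify_error_taxonomy_v2 (reasons : List String) (out : List (String × Int)) : Prop := out = classify_error_taxonomy_v2_alt reasons
instance (reasons : List String) (out : List (String × Int)) : Decidable (Spec_classify_error_taxonomy_v2 reasons out) := by unfold Spec_classify_error_taxonomy_v2; infer_instance

-- ===== CLAIM (what is proved, stated in full; the proofs are below) =====
def Claim_equal_classify_error_taxonomy_v2 : Prop := ∀ (reasons : List String), Dom_classify_error_taxonomy_v2 reasons → Spec_classify_error_taxonomy_v2 reasons (classify_error_taxonomy_v2 reasons)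

-- ===== LEMMAS AND PROOFS =====

-- the dict with the eight fixed bucket keys, as a function of the eight counters
def pvMk8 (a b c d e f g h : Int) : PySem.Dict String Int := ⟨
    [("timing_error", a), ("exit_error", b), ("validation_error", c), ("selection_error", d),
     ("sizing_error", e), ("regime_mismatch", f), ("advisory_conflict", g), ("missed_opportunity", h)]⟩

theorem pvModify_0 (a b c d e f g h : Int) :
    (pvMk8 a b c d e f g h).modify "timing_error" 0 (· + 1) = pvMk8 (a+1) b c d e f g h := by
  simp [pvMk8, PySem.Dict.modify, PySem.Dict.insert, PySem.Dict.getD, PySem.Dict.get?, PySem.Dict.contains]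
theorem pvModify_1 (a b c d e f g h : Int) :
    (pvMk8 a b c d e f g h).modify "exit_error" 0 (· + 1) = pvMk8 a (b+1) c d e f g h := by
  simp [pvMk8, PySem.Dict.modify, PySem.Dict.insert, PySem.Dict.getD, PySem.Dict.get?, PySem.Dict.contains]
theorem pvModify_2 (a b c d e f g h : Int) :
    (pvMk8 a b c d e f g h).modify "validation_error" 0 (· + 1) = pvMk8 a b (c+1) d e f g h := by
  simp [pvMk8, PySem.Dict.modify, PySem.Dict.insert, PySem.Dict.getD, PySem.Dict.get?, PySem.Dict.contains]
theorem pvModify_3 (a b c d e f g h : Int) :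
    (pvMk8 a b c d e f g h).modify "selection_error" 0 (· + 1) = pvMk8 a b c (d+1) e f g h := by
  simp [pvMk8, PySem.Dict.modify, PySem.Dict.insert, PySem.Dict.getD, PySem.Dict.get?, PySem.Dict.contains]
theorem pvModify_4 (a b c d e f g h : Int) :
    (pvMk8 a b c d e f g h).modify "sizing_error" 0 (· + 1) = pvMk8 a b c d (e+1) f g h := by
  simp [pvMk8, PySem.Dict.modify, PySem.Dict.insert, PySem.Dict.getD, PySem.Dict.get?, PySem.Dict.contains]
theorem pvModify_5 (a b c d e f g h : Int) :
    (pvMk8 a b c d e f g h).modify "regime_mismatch" 0 (· + 1) = pvMk8 a b c d e (f+1) g h := by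
  simp [pvMk8, PySem.Dict.modify, PySem.Dict.insert, PySem.Dict.getD, PySem.Dict.get?, PySem.Dict.contains]
theorem pvModify_6 (a b c d e f g h : Int) :
    (pvMk8 a b c d e f g h).modify "advisory_conflict" 0 (· + 1) = pvMk8 a b c d e f (g+1) h := by
  simp [pvMk8, PySem.Dict.modify, PySem.Dict.insert, PySem.Dict.getD, PySem.Dict.get?, PySem.Dict.contains]
theorem pvModify_7 (a b c d e f g h : Int) :
    (pvMk8 a b c d e f g h).modify "missed_opportunity" 0 (· + 1) = pvMk8 a b c d e f g (h+1) := by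
  simp [pvMk8, PySem.Dict.modify, PySem.Dict.insert, PySem.Dict.getD, PySem.Dict.get?, PySem.Dict.contains]

-- a nonempty keyword never occurs in the empty string
theorem pvIsIn_nil (c : Char) (k : List Char) : PySem.Chars.isIn (c :: k) [] = false := by
  rw [PySem.Chars.isIn_eq_false_iff]
  simp

set_option maxHeartbeats 1000000 in
theorem pvStepA_mk8 (a b c d e f g h : Int) (s : String) :
    pvStepA (pvMk8 a b c d e f g h) s =
    pvMk8 (a + if pvHit ["market_closed", "timing"] s then 1 else 0)
          (b + if pvHit ["exit", "de_risk"] s then 1 else 0)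
          (c + if pvHit ["validation", "spread", "drift"] s then 1 else 0)
          (d + if pvHit ["open_symbol_guard", "options_only_requires_options", "selection"] s then 1 else 0)
          (e + if pvHit ["max open positions", "size", "sizing"] s then 1 else 0)
          (f + if pvHit ["regime"] s then 1 else 0)
          (g + if pvHit ["advisory", "local_model"] s then 1 else 0)
          (h + if pvHit ["open_symbol_guard", "options_only_requires_options", "selection"] s then 1 else 0) := by
  by_cases hs : s = ""
  · subst hs
    simp [pvStepA, pvHit, pvIsIn_nil]
  · simp only [pvStepA, if_neg hs, pvHit, List.any_cons, List.any_nil, Bool.or_false, Bool.or_assoc]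
    split_ifs <;>
      simp only [pvModify_0, pvModify_1, pvModify_2, pvModify_3, pvModify_4, pvModify_5, pvModify_6,
        pvModify_7, add_zero]

theorem pvFold_mk8 (l : List String) (a b c d e f g h : Int) :
    l.foldl pvStepA (pvMk8 a b c d e f g h) =
    pvMk8 (a + pvCount l ["market_closed", "timing"])
          (b + pvCount l ["exit", "de_risk"])
          (c + pvCount l ["validation", "spread", "drift"])
          (d + pvCount l ["open_symbol_guard", "options_only_requires_options", "selection"])
          (e + pvCount l ["max open positions", "size", "sizing"])
          (f + pvCount l ["regime"])
          (g + pvCount l ["advisory", "local_model"])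
          (h + pvCount l ["open_symbol_guard", "options_only_requires_options", "selection"]) := by
  induction l generalizing a b c d e f g h with
  | nil => simp [pvCount]
  | cons s l ih =>
    rw [List.foldl_cons, pvStepA_mk8, ih]
    congr 1 <;> (simp only [pvCount, List.countP_cons]; push_cast; split_ifs <;> omega)

theorem pvOfList_eq : (PySem.Dict.ofList
    [("timing_error", (0:Int)), ("exit_error", 0), ("validation_error", 0), ("selection_error", 0),
     ("sizing_error", 0), ("regime_mismatch", 0), ("advisory_conflict", 0), ("missed_opportunity", 0)])
    = pvMk8 0 0 0 0 0 0 0 0 := by decide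

-- ===== VERDICT (by name: the statement is the Claim_ definition above) =====
theorem classify_error_taxonomy_v2_spec : Claim_equal_classify_error_taxonomy_v2 := by
  intro reasons _
  show classify_error_taxonomy_v2 reasons = classify_error_taxonomy_v2_alt reasons
  have hnorm : pvNormA = pvNormB := rfl
  simp only [classify_error_taxonomy_v2, classify_error_taxonomy_v2_alt, hnorm, pvOfList_eq]
  rw [pvFold_mk8]
  simp only [pvMk8, zero_add]
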